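-- pv_equiv track=rewrite | github.com/srijanshukla18/rapviz | server/phoneme_rhyme.py | extract_rhyme_tail
-- ===== SOURCE A (Python) =====
-- from typing import List, Dict, Tuple, Optional, Set
--
-- def extract_rhyme_tail(phonemes: List[str]) -> Optional[Tuple[str, ...]]:
--     """
--     Extract the rhyme tail from a phoneme sequence.
--
--     The rhyme tail is defined as the phoneme sequence from the last
--     stressed vowel to the end of the word.
--
--     For example:
--     - "SCAR" → [S, K, AA1, R] → tail: (AA1, R)
--     - "CAR" → [K, AA1, R] → tail: (AA1, R)
--
--     Args:
--         phonemes: List of phonemes in ARPABET format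
--
--     Returns:
--         Tuple of phonemes representing the rhyme tail, or None
--     """
--     if not phonemes:
--         return None
--
--     # Find the last stressed vowel (phonemes ending in 0, 1, or 2)
--     last_stressed_idx = None
--     for i in range(len(phonemes) - 1, -1, -1):
--         phoneme = phonemes[i]
--         # Check if this is a stressed vowel (ends with 0, 1, or 2)
--         if any(phoneme.endswith(stress) for stress in ['0', '1', '2']):
--             last_stressed_idx = i
--             break
--
--     # If no stressed vowel found, use the last vowel-like phoneme
--     if last_stressed_idx is None:
--         # Look for any vowel (even unstressed)
--         for i in range(len(phonemes) - 1, -1, -1):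
--             phoneme = phonemes[i]
--             # Vowels in ARPABET contain letters like A, E, I, O, U
--             if any(v in phoneme for v in ['A', 'E', 'I', 'O', 'U']):
--                 last_stressed_idx = i
--                 break
--
--     # If still no vowel found, use the whole word
--     if last_stressed_idx is None:
--         return tuple(phonemes)
--
--     # Return from last stressed vowel to end
--     return tuple(phonemes[last_stressed_idx:])
-- ===== SOURCE B (Python) =====
-- from typing import List, Tuple, Optional
--
-- def extract_rhyme_tail(phonemes: List[str]) -> Optional[Tuple[str, ...]]:
--     """Single forward pass: track the last stressed-vowel index and the last
--     vowel-like index simultaneously, then slice once at the end."""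
--     if not phonemes:
--         return None
--     last_stressed = None
--     last_vowel = None
--     for i, p in enumerate(phonemes):
--         if p.endswith('0') or p.endswith('1') or p.endswith('2'):
--             last_stressed = i
--         if ('A' in p) or ('E' in p) or ('I' in p) or ('O' in p) or ('U' in p):
--             last_vowel = i
--     idx = last_stressed if last_stressed is not None else last_vowel
--     if idx is None:
--         return tuple(phonemes)
--     return tuple(phonemes[idx:])
-- ===== Notes on version B (the rewrite author's own statement) =====
-- stated objective: alternative
-- what changed: Replaced A's two backward index scans with break (stressed first, then vowel fallback) by a single forward pass over enumerate(phonemes) that maintains both running last-match indices and selects afterwards; the per-phoneme any()-generator tests become plain or-chains.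
import Mathlib
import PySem

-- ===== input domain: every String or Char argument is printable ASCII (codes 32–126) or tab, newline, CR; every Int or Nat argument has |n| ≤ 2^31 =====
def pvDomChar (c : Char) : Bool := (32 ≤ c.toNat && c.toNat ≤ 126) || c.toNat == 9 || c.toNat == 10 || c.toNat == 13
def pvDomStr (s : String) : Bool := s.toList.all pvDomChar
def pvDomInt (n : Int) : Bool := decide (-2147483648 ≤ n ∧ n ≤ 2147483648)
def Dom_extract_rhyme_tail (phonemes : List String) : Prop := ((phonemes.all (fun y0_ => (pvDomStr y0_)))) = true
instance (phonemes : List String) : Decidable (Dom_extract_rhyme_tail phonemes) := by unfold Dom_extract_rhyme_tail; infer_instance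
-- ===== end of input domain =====

-- B replaces A's two backward scans-with-break by one forward pass maintaining both
-- running indices (alternative decomposition; same asymptotic cost).


-- ===== PORT A =====
-- A's stress test: any(phoneme.endswith(stress) for stress in ['0','1','2'])
def pvStressA (phoneme : String) : Bool :=
  (["0", "1", "2"]).any (fun stress => PySem.Str.endswith phoneme stress)

-- A's vowel test: any(v in phoneme for v in ['A','E','I','O','U'])
def pvVowelA (phoneme : String) : Bool :=
  (["A", "E", "I", "O", "U"]).any (fun v => PySem.Str.isIn v phoneme)

-- A's backward 'for i in range(...): ... break' loop: first index in idxs whose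
-- phoneme satisfies p (the pyGet? none branch is unreachable: every index produced
-- by range(len-1, -1, -1) is in bounds, where Python would never raise).
def pvFindA (phonemes : List String) (p : String → Bool) : List Int → Option Int
  | [] => none
  | i :: rest =>
    match PySem.List.pyGet? phonemes i with
    | none => none
    | some phoneme => if p phoneme then some i else pvFindA phonemes p rest

def extract_rhyme_tail (phonemes : List String) : Option (List String) :=
  if phonemes.isEmpty then none
  else
    let rng := PySem.List.pyRange ((phonemes.length : Int) - 1) (-1) (-1)
    let idx1 := pvFindA phonemes pvStressA rng
    let idx2 :=
      match idx1 with
      | some i => some i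
      | none => pvFindA phonemes pvVowelA rng
    match idx2 with
    | none => some phonemes
    | some i => some (PySem.List.slice phonemes (some i) none)

-- ===== PORT B =====
-- B's stress test: p.endswith('0') or p.endswith('1') or p.endswith('2')
def pvStressB (p : String) : Bool :=
  PySem.Str.endswith p "0" || PySem.Str.endswith p "1" || PySem.Str.endswith p "2"

-- B's vowel test: ('A' in p) or ('E' in p) or ('I' in p) or ('O' in p) or ('U' in p)
def pvVowelB (p : String) : Bool :=
  PySem.Str.isIn "A" p || PySem.Str.isIn "E" p || PySem.Str.isIn "I" p ||
  PySem.Str.isIn "O" p || PySem.Str.isIn "U" p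

def extract_rhyme_tail_alt (phonemes : List String) : Option (List String) :=
  if phonemes.isEmpty then none
  else
    let st := (PySem.List.enumerate phonemes 0).foldl
      (fun (s : Option Int × Option Int) iv =>
        (if pvStressB iv.2 then some iv.1 else s.1,
         if pvVowelB iv.2 then some iv.1 else s.2)) (none, none)
    let idx := match st.1 with | some i => some i | none => st.2
    match idx with
    | none => some phonemes
    | some i => some (PySem.List.slice phonemes (some i) none)

-- ===== PRECONDITION & SPEC =====
def Spec_extract_rhyme_tail (phonemes : List String) (out : Option (List String)) : Prop := out = extract_rhyme_tail_alt phonemes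
instance (phonemes : List String) (out : Option (List String)) : Decidable (Spec_extract_rhyme_tail phonemes out) := by unfold Spec_extract_rhyme_tail; infer_instance

-- ===== CLAIM (what is proved, stated in full; the proofs are below) =====
def Claim_equal_extract_rhyme_tail : Prop := ∀ (phonemes : List String), Dom_extract_rhyme_tail phonemes → Spec_extract_rhyme_tail phonemes (extract_rhyme_tail phonemes)

-- ===== LEMMAS AND PROOFS =====

-- B's per-predicate running "last index" loop, isolated for the proof.
def pvLast (xs : List String) (p : String → Bool) : Option Int :=
  (PySem.List.enumerate xs 0).foldl (fun s iv => if p iv.2 then some iv.1 else s) none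

theorem pvStress_eq : pvStressA = pvStressB := by
  funext p
  simp [pvStressA, pvStressB, List.any, Bool.or_assoc]

theorem pvVowel_eq : pvVowelA = pvVowelB := by
  funext p
  simp [pvVowelA, pvVowelB, List.any, Bool.or_assoc]

theorem pyGet?_append_left (xs : List String) (x : String) (i : Int)
    (h0 : 0 ≤ i) (h : i < xs.length) :
    PySem.List.pyGet? (xs ++ [x]) i = PySem.List.pyGet? xs i := by
  simp [PySem.List.pyGet?, PySem.List.pyIdx?, h0]
  rw [if_pos (by omega), if_pos h]
  simp only [Option.bind_some]
  rw [List.getElem?_append_left (by omega : i.toNat < xs.length)]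

theorem pvFindA_append (xs : List String) (x : String) (p : String → Bool)
    (idxs : List Int) (h : ∀ i ∈ idxs, 0 ≤ i ∧ i < xs.length) :
    pvFindA (xs ++ [x]) p idxs = pvFindA xs p idxs := by
  induction idxs with
  | nil => rfl
  | cons i rest ih =>
    have hi := h i (by simp)
    simp only [pvFindA, pyGet?_append_left xs x i hi.1 hi.2]
    rw [ih (fun j hj => h j (by simp [hj]))]

theorem pvLast_append (xs : List String) (x : String) (p : String → Bool) :
    pvLast (xs ++ [x]) p
      = if p x then some (xs.length : Int) else pvLast xs p := by
  simp [pvLast, PySem.List.enumerate_append, PySem.List.enumerate_cons,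
    PySem.List.enumerate_nil, List.foldl_append]

theorem pvFindA_eq_pvLast (xs : List String) (p : String → Bool) :
    pvFindA xs p (PySem.List.pyRange ((xs.length : Int) - 1) (-1) (-1)) = pvLast xs p := by
  induction xs using List.reverseRecOn with
  | nil =>
    rw [PySem.List.pyRange_neg_one_eq_nil (by simp)]
    rfl
  | append_singleton xs x ih =>
    have hlen : (((xs ++ [x]).length : Int) - 1) = (xs.length : Int) := by
      simp
    rw [hlen, PySem.List.pyRange_neg_one_cons (by omega)]
    have hget : PySem.List.pyGet? (xs ++ [x]) (xs.length : Int) = some x := by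
      simp [PySem.List.pyGet?, PySem.List.pyIdx?]
    simp only [pvFindA, hget, pvLast_append]
    by_cases hp : p x
    · simp [hp]
    · simp only [hp, if_neg, Bool.false_eq_true, not_false_eq_true]
      rw [pvFindA_append xs x p _ (by
        intro i hi
        rw [PySem.List.mem_pyRange_neg_one] at hi
        omega)]
      exact ih

-- ===== VERDICT (by name: the statement is the Claim_ definition above) =====
theorem extract_rhyme_tail_spec : Claim_equal_extract_rhyme_tail := by
  intro phonemes _
  unfold Spec_extract_rhyme_tail extract_rhyme_tail extract_rhyme_tail_alt
  by_cases he : phonemes.isEmpty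
  · simp [he]
  · simp only [he]
    rw [PySem.List.foldl_prod_mk
      (f := fun s (iv : Int × String) => if pvStressB iv.2 then some iv.1 else s)
      (g := fun s (iv : Int × String) => if pvVowelB iv.2 then some iv.1 else s)]
    rw [show ∀ q, (PySem.List.enumerate phonemes 0).foldl
        (fun s (iv : Int × String) => if q iv.2 then some iv.1 else s) none = pvLast phonemes q
      from fun q => rfl, show ∀ q, (PySem.List.enumerate phonemes 0).foldl
        (fun s (iv : Int × String) => if q iv.2 then some iv.1 else s) none = pvLast phonemes q
      from fun q => rfl]
    rw [pvFindA_eq_pvLast, pvFindA_eq_pvLast, pvStress_eq, pvVowel_eq]
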